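-- pv_equiv track=rewrite | github.com/maxbergmark/old-work | GruPDat/Slutuppgift/program.py | answercheck
-- ===== SOURCE A (Python) =====
-- def answercheck(string):
--     count = 0
--     for letter in sorted(string):
--         if not letter.isalpha():
--             return False
--         if sorted(string).count(letter) > 1:
--             return False
--     return True
-- ===== SOURCE B (Python) =====
-- def answercheck(string):
--     return all(c.isalpha() for c in string) and len(set(string)) == len(string)
-- ===== Notes on version B (the rewrite author's own statement) =====
-- stated objective: faster
-- what changed: Replaced the early-return loop over sorted(string) that recomputes sorted(string) and scans it with .count for every character by a single all() pass for the alphabetic test plus one set-cardinality comparison for uniqueness.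
import Mathlib
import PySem

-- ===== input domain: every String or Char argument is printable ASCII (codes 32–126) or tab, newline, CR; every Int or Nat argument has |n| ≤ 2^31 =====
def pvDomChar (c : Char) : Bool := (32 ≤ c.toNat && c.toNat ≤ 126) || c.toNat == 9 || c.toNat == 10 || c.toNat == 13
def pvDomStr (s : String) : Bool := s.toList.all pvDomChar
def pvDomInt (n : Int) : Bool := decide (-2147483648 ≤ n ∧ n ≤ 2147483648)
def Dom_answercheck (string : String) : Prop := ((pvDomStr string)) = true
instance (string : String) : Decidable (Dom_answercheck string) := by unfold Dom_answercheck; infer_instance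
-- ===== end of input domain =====

-- B replaces A's early-return loop over sorted(string) (which re-sorts and rescans with .count per character)
-- by one all() pass for alphabeticity plus a set-cardinality comparison for uniqueness (objective: faster).

-- ===== PORT A =====
-- the for-loop over sorted(string) with its two early returns ('count = 0' in A is dead state)
def answercheckGo (L : List Char) : List Char → Bool
  | [] => true
  | letter :: rest =>
    if !(PySem.Chars.isalpha letter) then false
    else if PySem.List.count L letter > 1 then false
    else answercheckGo L rest

def answercheck (string : String) : Bool :=
  answercheckGo (PySem.List.sorted string.toList (fun x => x) false)
                (PySem.List.sorted string.toList (fun x => x) false)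

-- ===== PORT B =====
def answercheck_alt (string : String) : Bool :=
  string.toList.all PySem.Chars.isalpha
    && ((PySem.Set.ofList string.toList).length == string.toList.length)

-- ===== PRECONDITION & SPEC =====
def Spec_answercheck (string : String) (out : Bool) : Prop := out = answercheck_alt string
instance (string : String) (out : Bool) : Decidable (Spec_answercheck string out) := by unfold Spec_answercheck; infer_instance

-- ===== CLAIM (what is proved, stated in full; the proofs are below) =====
def Claim_equal_answercheck : Prop := ∀ (string : String), Dom_answercheck string → Spec_answercheck string (answercheck string)

-- ===== LEMMAS AND PROOFS =====

-- the early-return loop is an 'all' over its list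
theorem answercheckGo_eq_all (L xs : List Char) :
    answercheckGo L xs
      = xs.all (fun c => PySem.Chars.isalpha c && !(decide (PySem.List.count L c > 1))) := by
  induction xs with
  | nil => rfl
  | cons c rest ih =>
    simp only [answercheckGo, List.all_cons, ih]
    by_cases h : PySem.Chars.isalpha c = true
    · by_cases h2 : PySem.List.count L c > 1 <;> simp_all
    · simp [Bool.eq_false_iff.mpr h]

-- set(l) has the same number of elements as l iff l has no duplicates
theorem length_ofList_eq_iff (l : List Char) :
    (PySem.Set.ofList l).length = l.length ↔ l.Nodup := by
  induction l with
  | nil => simp [PySem.Set.ofList]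
  | cons x xs ih =>
    rw [PySem.Set.ofList_cons]
    by_cases hx : x ∈ xs
    · have hmem : x ∈ PySem.Set.ofList xs := (PySem.Set.mem_ofList xs x).mpr hx
      have hlt : ((PySem.Set.ofList xs).discard x).length < (PySem.Set.ofList xs).length := by
        unfold PySem.Set.discard
        exact List.length_filter_lt_length_iff_exists.mpr ⟨x, hmem, by simp⟩
      have hle := PySem.Set.length_ofList_le xs
      constructor
      · intro h; simp only [List.length_cons] at h; omega
      · intro h; exact absurd hx (by simp_all)
    · have hdis : (PySem.Set.ofList xs).discard x = PySem.Set.ofList xs := by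
        unfold PySem.Set.discard
        apply List.filter_eq_self.mpr
        intro a ha
        have hmemx : a ∈ xs := (PySem.Set.mem_ofList xs a).mp ha
        have hne : a ≠ x := fun hax => hx (hax ▸ hmemx)
        simp [hne]
      rw [hdis]
      simp [List.nodup_cons, hx, ← ih]

-- ===== VERDICT (by name: the statement is the Claim_ definition above) =====
theorem answercheck_spec : Claim_equal_answercheck := by
  intro s _
  unfold Spec_answercheck answercheck answercheck_alt
  set l := s.toList with hl
  have hperm : (PySem.List.sorted l (fun x => x) false).Perm l := PySem.List.sorted_perm _ _ _
  rw [answercheckGo_eq_all, hperm.all_eq]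
  have hcount : ∀ c, PySem.List.count (PySem.List.sorted l (fun x => x) false) c
      = PySem.List.count l c := by
    intro c; simp only [PySem.List.count_eq]; exact hperm.count_eq c
  simp only [hcount]
  by_cases hall : l.all PySem.Chars.isalpha = true
  · rw [hall, Bool.true_and]
    have halpha := List.all_eq_true.mp hall
    by_cases he : ((PySem.Set.ofList l).length == l.length) = true
    · have hnd : l.Nodup := (length_ofList_eq_iff l).mp (by simpa using he)
      have hcle := List.nodup_iff_count_le_one.mp hnd
      rw [he]
      apply List.all_eq_true.mpr
      intro c hc
      simp only [PySem.List.count_eq, Bool.and_eq_true]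
      refine ⟨halpha c hc, by simp; have := hcle c; omega⟩
    · have he' : ((PySem.Set.ofList l).length == l.length) = false := eq_false_of_ne_true he
      have hnd : ¬ l.Nodup := fun h => by
        simp [(length_ofList_eq_iff l).mpr h] at he'
      obtain ⟨a, ha⟩ : ∃ a, ¬ List.count a l ≤ 1 := by
        by_contra h; push Not at h; exact hnd (List.nodup_iff_count_le_one.mpr h)
      have hal : a ∈ l := by
        by_contra hni; exact ha (by simp [List.count_eq_zero_of_not_mem hni])
      rw [he']
      apply List.all_eq_false.mpr
      refine ⟨a, hal, ?_⟩
      simp only [PySem.List.count_eq]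
      simp
      intro _
      omega
  · have hallf : l.all PySem.Chars.isalpha = false := eq_false_of_ne_true hall
    obtain ⟨c, hc, hnc⟩ := List.all_eq_false.mp hallf
    rw [hallf, Bool.false_and]
    exact List.all_eq_false.mpr ⟨c, hc, by simp [hnc]⟩
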